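-- pv_equiv track=rewrite | github.com/YEOMSSS/Baekjoon | 00. Guitar/templates/Tsearch.py | ternary_search
-- ===== SOURCE A (Python) =====
-- def f(x):
--     # 예시 함수: x=3에서 최솟값 2를 가짐
--     return (x - 3) ** 2 + 2
--
-- def ternary_search(low, high):
--     # 둘 다 정수를 유지하기 위해 low <= m1 < m2 <= high 구조 유지
--     while high - low >= 3:
--         # 셋으로 나눠 m1, m2를 지정하자.
--         m1 = (2 * low + high) // 3
--         m2 = (low + 2 * high) // 3
--
--         # f(m1)이 f(m2)보다 작으면 단봉은 low-m2 사이에 있다.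
--         if f(m1) < f(m2):
--             high = m2
--         # f(m1)이 f(m2)보다 크면 단봉은 m1-high 사이에 있다.
--         else:
--             low = m1
--
--     # 범위 내 후보를 전부 검사해서 뱉어주자.
--     return min(f(t) for t in range(low, high + 1))
-- ===== SOURCE B (Python) =====
-- def f(x):
--     return (x - 3) ** 2 + 2
--
-- def ternary_search(low, high):
--     # Binary search on the discrete slope: find the first point where f stops decreasing.
--     lo, hi = low, high
--     while lo < hi:
--         mid = (lo + hi) // 2
--         if f(mid) < f(mid + 1):
--             hi = mid
--         else:
--             lo = mid + 1
--     return f(lo)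
-- ===== Notes on version B (the rewrite author's own statement) =====
-- stated objective: alternative
-- what changed: Replaced two-probe ternary search plus a final min() over the residual window by a binary search on the discrete slope (compare f(mid) with f(mid+1)), returning f at the converged point directly.
import Mathlib
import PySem

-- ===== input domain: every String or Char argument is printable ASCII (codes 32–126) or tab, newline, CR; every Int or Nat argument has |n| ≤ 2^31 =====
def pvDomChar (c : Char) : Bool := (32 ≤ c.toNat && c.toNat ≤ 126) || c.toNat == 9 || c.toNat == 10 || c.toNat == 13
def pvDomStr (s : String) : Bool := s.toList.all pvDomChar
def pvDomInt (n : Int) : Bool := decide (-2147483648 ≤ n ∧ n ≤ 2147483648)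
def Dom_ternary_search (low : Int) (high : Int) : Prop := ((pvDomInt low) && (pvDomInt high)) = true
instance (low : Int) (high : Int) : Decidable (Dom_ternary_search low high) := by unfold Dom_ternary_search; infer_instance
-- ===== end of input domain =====

-- B replaces the two-probe ternary-search loop by a binary search on the discrete slope; same return value on low ≤ high.

-- ===== PORT A =====
-- the module-level helper f
def pyf (x : Int) : Int := (x - 3) ^ 2 + 2

-- the while-loop of A: returns the final (low, high)
def tsLoop (low : Int) (high : Int) : Int × Int :=
  if _h : 3 ≤ high - low then
    let m1 := PySem.Int.floordiv (2 * low + high) 3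
    let m2 := PySem.Int.floordiv (low + 2 * high) 3
    if pyf m1 < pyf m2 then tsLoop low m2 else tsLoop m1 high
  else (low, high)
termination_by (high - low).toNat
decreasing_by
  · have h1 : 3 * PySem.Int.floordiv (low + 2 * high) 3 ≤ low + 2 * high := by
      have := (PySem.Int.le_floordiv_iff_mul_le (a := low + 2 * high) (b := 3)
        (q := PySem.Int.floordiv (low + 2 * high) 3) (by omega)).mp le_rfl
      omega
    omega
  · have h1 : 2 * low + high < (PySem.Int.floordiv (2 * low + high) 3 + 1) * 3 :=
      ((PySem.Int.floordiv_eq_iff_of_pos (by omega)).mp rfl).2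
    omega

def ternary_search (low : Int) (high : Int) : Int :=
  let p := tsLoop low high
  -- min(f(t) for t in range(low, high+1)); Python min raises ValueError on the empty
  -- range (low > high, excluded by Pre_); the .getD 0 default is unreachable inside Pre_
  (PySem.List.min? ((PySem.List.pyRange p.1 (p.2 + 1) 1).map pyf) (fun y => y)).getD 0

-- ===== PORT B =====
-- the while-loop of B: binary search on the slope, returns the converged point
def bsLoop (lo : Int) (hi : Int) : Int :=
  if _h : lo < hi then
    let mid := PySem.Int.floordiv (lo + hi) 2
    if pyf mid < pyf (mid + 1) then bsLoop lo mid else bsLoop (mid + 1) hi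
  else lo
termination_by (hi - lo).toNat
decreasing_by
  · have h1 : PySem.Int.floordiv (lo + hi) 2 < hi :=
      (PySem.Int.floordiv_lt_iff_lt_mul (by omega)).mpr (by omega)
    omega
  · have h2 := PySem.Int.floordiv_two_mid_bounds (lo := lo) (hi := hi) (by omega)
    omega

def ternary_search_alt (low : Int) (high : Int) : Int :=
  pyf (bsLoop low high)

-- ===== PRECONDITION & SPEC =====
-- Pre_ excludes low > high, on which A's min() is applied to an empty range and raises ValueError
def Pre_ternary_search (low : Int) (high : Int) : Prop := low ≤ high
instance (low : Int) (high : Int) : Decidable (Pre_ternary_search low high) := by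
  unfold Pre_ternary_search; infer_instance
def pvWitness_ternary_search : Int × Int := (0, 10)

def Spec_ternary_search (low : Int) (high : Int) (out : Int) : Prop := out = ternary_search_alt low high
instance (low : Int) (high : Int) (out : Int) : Decidable (Spec_ternary_search low high out) := by unfold Spec_ternary_search; infer_instance

-- ===== CLAIM (what is proved, stated in full; the proofs are below) =====
def Claim_equal_ternary_search : Prop := ∀ (low : Int) (high : Int), Dom_ternary_search low high → Pre_ternary_search low high → Spec_ternary_search low high (ternary_search low high)

-- ===== LEMMAS AND PROOFS =====

-- f's order between two points a < b is decided by the position of the vertex 3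
theorem pyf_lt_iff {a b : Int} (hab : a < b) : pyf a < pyf b ↔ 6 < a + b := by
  unfold pyf
  constructor <;> intro h <;> nlinarith

-- the clamped vertex max l (min h 3) is invariant through A's loop, and the final window is small
-- f decreases towards the vertex 3 and increases after it (≤ forms for min computations)
theorem pyf_le_of_le {a b : Int} (hab : a < b) (h : a + b ≤ 6) : pyf b ≤ pyf a := by
  unfold pyf; nlinarith

theorem pyf_le_of_gt {a b : Int} (hab : a < b) (h : 6 < a + b) : pyf a ≤ pyf b := by
  unfold pyf; nlinarith

-- the clamped vertex max l (min h 3) is invariant through A's loop, and the final window is small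
theorem tsLoop_spec (low high : Int) (hle : low ≤ high) :
    (tsLoop low high).1 ≤ (tsLoop low high).2 ∧
    (tsLoop low high).2 - (tsLoop low high).1 ≤ 2 ∧
    max (tsLoop low high).1 (min (tsLoop low high).2 3) = max low (min high 3) := by
  induction low, high using tsLoop.induct with
  | case1 low high h m1 m2 hcond ih =>
    have hm1 := (PySem.Int.floordiv_eq_iff_of_pos (a := 2 * low + high) (b := 3)
      (q := m1) (by omega)).mp rfl
    have hm2 := (PySem.Int.floordiv_eq_iff_of_pos (a := low + 2 * high) (b := 3)
      (q := m2) (by omega)).mp rfl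
    have hlt : m1 < m2 := by omega
    have hsum : 6 < m1 + m2 := (pyf_lt_iff hlt).mp hcond
    have hstep : tsLoop low high = tsLoop low m2 := by
      rw [tsLoop]; simp only [dif_pos h]; rw [if_pos hcond]
    rw [hstep]
    obtain ⟨i1, i2, i3⟩ := ih (by omega)
    exact ⟨i1, i2, by omega⟩
  | case2 low high h m1 m2 hcond ih =>
    have hm1 := (PySem.Int.floordiv_eq_iff_of_pos (a := 2 * low + high) (b := 3)
      (q := m1) (by omega)).mp rfl
    have hm2 := (PySem.Int.floordiv_eq_iff_of_pos (a := low + 2 * high) (b := 3)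
      (q := m2) (by omega)).mp rfl
    have hlt : m1 < m2 := by omega
    have hsum : m1 + m2 ≤ 6 := by
      by_contra hc
      exact hcond ((pyf_lt_iff hlt).mpr (by omega))
    have hstep : tsLoop low high = tsLoop m1 high := by
      rw [tsLoop]; simp only [dif_pos h]; rw [if_neg hcond]
    rw [hstep]
    obtain ⟨i1, i2, i3⟩ := ih (by omega)
    exact ⟨i1, i2, by omega⟩
  | case3 low high h =>
    have hstep : tsLoop low high = (low, high) := by
      rw [tsLoop]; simp only [dif_neg h]
    rw [hstep]
    refine ⟨hle, by omega, rfl⟩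

-- the clamped vertex is where B's loop converges
theorem bsLoop_spec (lo hi : Int) (hle : lo ≤ hi) :
    bsLoop lo hi = max lo (min hi 3) := by
  induction lo, hi using bsLoop.induct with
  | case1 lo hi h mid hcond ih =>
    have hb := PySem.Int.floordiv_two_mid_bounds (lo := lo) (hi := hi) (by omega)
    have hmlt : mid < hi :=
      (PySem.Int.floordiv_lt_iff_lt_mul (by omega)).mpr (by omega)
    have hsum : 6 < mid + (mid + 1) := (pyf_lt_iff (by omega)).mp hcond
    have hstep : bsLoop lo hi = bsLoop lo mid := by
      rw [bsLoop]; simp only [dif_pos h]; rw [if_pos hcond]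
    rw [hstep, ih (by omega)]; omega
  | case2 lo hi h mid hcond ih =>
    have hb := PySem.Int.floordiv_two_mid_bounds (lo := lo) (hi := hi) (by omega)
    have hmlt : mid < hi :=
      (PySem.Int.floordiv_lt_iff_lt_mul (by omega)).mpr (by omega)
    have hsum : mid + (mid + 1) ≤ 6 := by
      by_contra hc
      exact hcond ((pyf_lt_iff (by omega)).mpr (by omega))
    have hstep : bsLoop lo hi = bsLoop (mid + 1) hi := by
      rw [bsLoop]; simp only [dif_pos h]; rw [if_neg hcond]
    rw [hstep, ih (by omega)]; omega
  | case3 lo hi h =>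
    have hstep : bsLoop lo hi = lo := by
      rw [bsLoop]; simp only [dif_neg h]
    rw [hstep]; omega

-- min of f over a window of width ≤ 2 is f at the clamped vertex
theorem min_small (l h : Int) (hle : l ≤ h) (hw : h - l ≤ 2) :
    (PySem.List.min? ((PySem.List.pyRange l (h + 1) 1).map pyf) (fun y => y)).getD 0
      = pyf (max l (min h 3)) := by
  have hcase : h = l ∨ h = l + 1 ∨ h = l + 2 := by omega
  rcases hcase with rfl | rfl | rfl
  · rw [PySem.List.pyRange_one_cons (by omega), PySem.List.pyRange_one_eq_nil (by omega)]
    simp only [List.map, PySem.List.min?_id_cons, List.foldl, Option.getD_some]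
    congr 1
    omega
  · rw [PySem.List.pyRange_one_cons (by omega), PySem.List.pyRange_one_cons (by omega),
      PySem.List.pyRange_one_eq_nil (by omega)]
    simp only [List.map, PySem.List.min?_id_cons, List.foldl, Option.getD_some]
    by_cases h3 : l + 1 ≤ 3
    · have hc : max l (min (l + 1) 3) = l + 1 := by omega
      rw [hc, min_eq_right (pyf_le_of_le (by omega) (by omega))]
    · have hc : max l (min (l + 1) 3) = l := by omega
      rw [hc, min_eq_left (pyf_le_of_gt (by omega) (by omega))]
  · rw [PySem.List.pyRange_one_cons (by omega), PySem.List.pyRange_one_cons (by omega),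
      PySem.List.pyRange_one_cons (by omega), PySem.List.pyRange_one_eq_nil (by omega)]
    simp only [List.map, PySem.List.min?_id_cons, List.foldl, Option.getD_some]
    have e : l + 1 + 1 = l + 2 := by ring
    rw [e]
    by_cases h3 : l ≤ 1
    · -- window entirely left of the vertex: f is decreasing on it
      have hc : max l (min (l + 2) 3) = l + 2 := by omega
      rw [hc, min_eq_right (pyf_le_of_le (show l < l + 1 by omega) (by omega)),
        min_eq_right (pyf_le_of_le (show l + 1 < l + 2 by omega) (by omega))]
    · by_cases h4 : 3 ≤ l
      · -- window right of the vertex: f is increasing on it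
        have hc : max l (min (l + 2) 3) = l := by omega
        rw [min_eq_left (pyf_le_of_gt (show l < l + 1 by omega) (by omega)),
          min_eq_left (pyf_le_of_gt (show l < l + 2 by omega) (by omega)), hc]
      · -- l = 2: the vertex 3 is the middle point
        have hl : l = 2 := by omega
        subst hl; norm_num [pyf]

-- ===== VERDICT (by name: the statement is the Claim_ definition above) =====
theorem ternary_search_spec : Claim_equal_ternary_search := by
  intro low high _ hpre
  unfold Spec_ternary_search ternary_search ternary_search_alt
  obtain ⟨h1, h2, h3⟩ := tsLoop_spec low high hpre
  rw [min_small _ _ h1 h2, h3, bsLoop_spec low high hpre]
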